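-- pv_equiv track=rewrite | github.com/sacrrie/reviewPractices | others/IDAstar.py | yshift
-- ===== SOURCE A (Python) =====
-- def shift(arr,inver):
--     if inver == 1:
--         temp=(arr*2)[1:len(arr)+1]
--     else:
--         temp=(arr*2)[-1-len(arr):-1]
--     return(temp)
--
-- def yshift(content,y,z):
--     temp=content.copy()
--     arr=[]
--     #extract the array
--     for i in content:
--         arr.append(i[y-1])
--     arr=shift(arr,z)
--     #put them back
--     for i in range(len(content)):
--         temp[i][y-1]=arr[i]
--     return(temp)
-- ===== SOURCE B (Python) =====
-- def yshift(content, y, z):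
--     # Rotates the column in place within a shallow copy: like A, the row
--     # objects are shared with `content`, so the caller observes the same
--     # in-place row mutations A performs.
--     temp = content.copy()
--     n = len(content)
--     if n == 0:
--         return temp
--     if z == 1:
--         first = content[0][y-1]
--         for i in range(n-1):
--             temp[i][y-1] = content[i+1][y-1]
--         temp[n-1][y-1] = first
--     else:
--         last = content[n-1][y-1]
--         for i in range(n-1, 0, -1):
--             temp[i][y-1] = content[i-1][y-1]
--         temp[0][y-1] = last
--     return temp
-- ===== Notes on version B (the rewrite author's own statement) =====
-- stated objective: simpler
-- what changed: B drops the column-extraction list and the shift helper: it rotates the column in place within the shallow copy with one pass per branch (forward for z==1, backward otherwise) plus a saved wrap-around element.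
import Mathlib
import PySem

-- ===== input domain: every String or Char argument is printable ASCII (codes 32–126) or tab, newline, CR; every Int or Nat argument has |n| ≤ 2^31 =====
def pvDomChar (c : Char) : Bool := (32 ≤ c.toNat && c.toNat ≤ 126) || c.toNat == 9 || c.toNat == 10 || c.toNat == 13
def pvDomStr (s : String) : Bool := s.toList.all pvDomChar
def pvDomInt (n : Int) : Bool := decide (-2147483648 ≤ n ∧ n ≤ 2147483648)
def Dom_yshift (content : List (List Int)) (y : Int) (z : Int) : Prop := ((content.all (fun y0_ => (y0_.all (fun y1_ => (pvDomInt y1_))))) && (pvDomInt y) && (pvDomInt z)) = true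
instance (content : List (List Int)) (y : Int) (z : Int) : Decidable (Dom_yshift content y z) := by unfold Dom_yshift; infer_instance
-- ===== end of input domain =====

-- B rotates the column in place within the shallow copy (no extracted column list, no
-- shift helper); both A and B mutate the shared row objects in place — the equivalence
-- proved here is about the returned value.

-- ===== PORT A =====
-- helper 'shift' of A: (arr*2)[1:len+1] or (arr*2)[-1-len:-1]
def yshiftShift (arr : List Int) (inver : Int) : List Int :=
  if inver = 1 then
    PySem.List.slice (arr ++ arr) (some 1) (some ((arr.length : Int) + 1))
  else
    PySem.List.slice (arr ++ arr) (some (-1 - (arr.length : Int))) (some (-1))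

def yshift (content : List (List Int)) (y : Int) (z : Int) : List (List Int) :=
  let temp := content
  let arr : List Int := content.foldl (fun acc i => acc ++ [PySem.List.pyGetD i (y - 1) 0]) []
  let arr2 := yshiftShift arr z
  (PySem.List.pyRange 0 (content.length : Int) 1).foldl
    (fun temp i =>
      PySem.List.pySetD temp i
        (PySem.List.pySetD (PySem.List.pyGetD temp i []) (y - 1) (PySem.List.pyGetD arr2 i 0)))
    temp

-- ===== PORT B =====
def yshift_alt (content : List (List Int)) (y : Int) (z : Int) : List (List Int) :=
  let temp := content
  let n := content.length
  if n = 0 then temp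
  else if z = 1 then
    let first := PySem.List.pyGetD (PySem.List.pyGetD content 0 []) (y - 1) 0
    let temp2 := (PySem.List.pyRange 0 ((n : Int) - 1) 1).foldl
      (fun temp i =>
        PySem.List.pySetD temp i
          (PySem.List.pySetD (PySem.List.pyGetD temp i []) (y - 1)
            (PySem.List.pyGetD (PySem.List.pyGetD content (i + 1) []) (y - 1) 0))) temp
    PySem.List.pySetD temp2 ((n : Int) - 1)
      (PySem.List.pySetD (PySem.List.pyGetD temp2 ((n : Int) - 1) []) (y - 1) first)
  else
    let last := PySem.List.pyGetD (PySem.List.pyGetD content ((n : Int) - 1) []) (y - 1) 0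
    let temp2 := (PySem.List.pyRange ((n : Int) - 1) 0 (-1)).foldl
      (fun temp i =>
        PySem.List.pySetD temp i
          (PySem.List.pySetD (PySem.List.pyGetD temp i []) (y - 1)
            (PySem.List.pyGetD (PySem.List.pyGetD content (i - 1) []) (y - 1) 0))) temp
    PySem.List.pySetD temp2 0
      (PySem.List.pySetD (PySem.List.pyGetD temp2 0 []) (y - 1) last)

-- ===== PRECONDITION & SPEC =====
-- A raises IndexError when y-1 is not a valid Python index into some row (negative wrap-around included);
-- Pre_ excludes exactly those inputs. The ports themselves agree everywhere, so the proof needs no more than that.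
def Pre_yshift (content : List (List Int)) (y : Int) (z : Int) : Prop :=
  ∀ row ∈ content, PySem.Raise.InRange row.length (y - 1)
instance (content : List (List Int)) (y : Int) (z : Int) : Decidable (Pre_yshift content y z) := by unfold Pre_yshift; infer_instance

def pvWitness_yshift : List (List Int) × Int × Int := ([[1, 2], [3, 4], [5, 6]], 1, 1)

def Spec_yshift (content : List (List Int)) (y : Int) (z : Int) (out : List (List Int)) : Prop := out = yshift_alt content y z
instance (content : List (List Int)) (y : Int) (z : Int) (out : List (List Int)) : Decidable (Spec_yshift content y z out) := by unfold Spec_yshift; infer_instance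

-- ===== CLAIM (what is proved, stated in full; the proofs are below) =====
def Claim_equal_yshift : Prop := ∀ (content : List (List Int)) (y : Int) (z : Int), Dom_yshift content y z → Pre_yshift content y z → Spec_yshift content y z (yshift content y z)

-- ===== LEMMAS AND PROOFS =====

lemma shift_one (arr : List Int) :
    yshiftShift arr 1 = arr.drop 1 ++ arr.take 1 := by
  unfold yshiftShift
  rw [if_pos rfl, PySem.List.slice_toNat _ (by omega) (by omega)]
  cases arr with
  | nil => simp
  | cons a t =>
    have h1 : (((((a :: t).length :Int)) + 1).toNat - (1:Int).toNat) = t.length + 1 := by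
      simp; try omega
    rw [h1]
    show List.take (t.length + 1) (List.drop 1 ((a :: t) ++ (a :: t))) = _
    rw [List.drop_append_of_le_length (by simp)]
    simp [List.take_append]


lemma shift_other (arr : List Int) (inver : Int) (h : inver ≠ 1) :
    yshiftShift arr inver = arr.drop (arr.length - 1) ++ arr.take (arr.length - 1) := by
  unfold yshiftShift
  rw [if_neg h]
  cases arr with
  | nil => simp [PySem.List.slice]
  | cons a t =>
    have e1 : (-1 - ((a :: t).length : Int)) = -(((t.length + 2 : Nat) : Int)) := by
      simp
      ring
    simp only [PySem.List.slice, e1]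
    rw [PySem.List.clampIdx_neg_natCast _ _ (by omega), PySem.List.clampIdx_neg_one]
    have e2 : (a :: t ++ a :: t).length - 1 - ((a :: t ++ a :: t).length - (t.length + 2)) = t.length + 1 := by
      simp; try omega
    have e3 : (a :: t ++ a :: t).length - (t.length + 2) = t.length := by simp; try omega
    rw [e2, e3]
    rw [List.drop_append_of_le_length (by simp)]
    rw [List.take_append]
    have e4 : (a :: t).length - 1 = t.length := by simp
    rw [e4]
    congr 1
    · exact List.take_of_length_le (by simp [List.length_drop]; try omega)
    · congr 1
      simp [List.length_drop]


lemma set_append_length {α : Type} (l1 l2 : List α) (a v : α) :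
    (l1 ++ a :: l2).set l1.length v = l1 ++ v :: l2 := by
  induction l1 with
  | nil => simp
  | cons x t ih => simp [ih]


lemma set_append_singleton {α : Type} (l : List α) (a v : α) (i : Nat) (hi : i = l.length) :
    (l ++ [a]).set i v = l ++ [v] := by
  subst hi
  simpa using set_append_length l [] a v


lemma foldl_write_fw (j : Int) (w : Int → Int) (post : List (List Int)) :
    ∀ (res rest : List (List Int)),
    (PySem.List.pyRange (res.length : Int) ((res.length + post.length : Nat) : Int) 1).foldl
      (fun temp i =>
        PySem.List.pySetD temp i
          (PySem.List.pySetD (PySem.List.pyGetD temp i []) j (w i))) (res ++ post ++ rest)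
    = res ++ post.mapIdx (fun k row => PySem.List.pySetD row j (w ((res.length + k : Nat) : Int))) ++ rest := by
  induction post with
  | nil => intro res rest; simp [PySem.List.pyRange_one_eq_nil]
  | cons row post' ih =>
    intro res rest
    rw [PySem.List.pyRange_one_cons (by push_cast [List.length_cons]; omega)]
    rw [List.foldl_cons]
    have hget : PySem.List.pyGetD (res ++ (row :: post') ++ rest) (res.length : Int) [] = row := by
      rw [PySem.List.pyGetD_natCast]
      rw [List.append_assoc]
      simp [List.getD_eq_getElem?_getD]
    rw [hget]
    have hset : PySem.List.pySetD (res ++ (row :: post') ++ rest) (res.length : Int)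
        (PySem.List.pySetD row j (w (res.length : Int)))
        = (res ++ [PySem.List.pySetD row j (w (res.length : Int))]) ++ post' ++ rest := by
      rw [PySem.List.pySetD_natCast]
      have ha : res ++ (row :: post') ++ rest = res ++ (row :: (post' ++ rest)) := by simp
      rw [ha, set_append_length res (post' ++ rest) row]
      simp
    rw [hset]
    have hlen : ((res.length : Int) + 1) = (((res ++ [PySem.List.pySetD row j (w (res.length : Int))]).length : Nat) : Int) := by
      simp
    have hlen2 : ((res.length + (row :: post').length : Nat) : Int)
        = (((res ++ [PySem.List.pySetD row j (w (res.length : Int))]).length + post'.length : Nat) : Int) := by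
      simp; omega
    rw [hlen, hlen2, ih]
    simp [List.mapIdx_cons]
    congr 1
    funext k row'
    have e : (res.length : Int) + 1 + (k : Int) = (res.length : Int) + ((k : Int) + 1) := by ring
    rw [e]


lemma foldl_write_bw (j : Int) (w : Int → Int) (post : List (List Int)) :
    ∀ (res rest : List (List Int)),
    (PySem.List.pyRange (((res.length + post.length : Nat) : Int) - 1) ((res.length : Int) - 1) (-1)).foldl
      (fun temp i =>
        PySem.List.pySetD temp i
          (PySem.List.pySetD (PySem.List.pyGetD temp i []) j (w i))) (res ++ post ++ rest)
    = res ++ post.mapIdx (fun k row => PySem.List.pySetD row j (w ((res.length + k : Nat) : Int))) ++ rest := by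
  induction post using List.reverseRecOn with
  | nil => intro res rest; simp [PySem.List.pyRange_neg_one_eq_nil]
  | append_singleton l row ih =>
    intro res rest
    rw [PySem.List.pyRange_neg_one_cons (by push_cast [List.length_append, List.length_cons]; omega)]
    rw [List.foldl_cons]
    have hi : ((res.length + (l ++ [row]).length : Nat) : Int) - 1 = ((res.length + l.length : Nat) : Int) := by
      push_cast [List.length_append, List.length_cons, List.length_nil]; omega
    have hsh : res ++ (l ++ [row]) ++ rest = (res ++ l) ++ (row :: rest) := by simp
    rw [hsh]
    have hget : PySem.List.pyGetD ((res ++ l) ++ (row :: rest)) (((res.length + (l ++ [row]).length : Nat) : Int) - 1) [] = row := by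
      rw [hi]
      have : ((res.length + l.length : Nat) : Int) = (((res ++ l).length : Nat) : Int) := by simp
      rw [this, PySem.List.pyGetD_natCast]
      simp [List.getD_eq_getElem?_getD]
    rw [hget, hi]
    have hset : PySem.List.pySetD ((res ++ l) ++ (row :: rest)) ((res.length + l.length : Nat) : Int)
        (PySem.List.pySetD row j (w ((res.length + l.length : Nat) : Int)))
        = res ++ l ++ (PySem.List.pySetD row j (w ((res.length + l.length : Nat) : Int)) :: rest) := by
      rw [PySem.List.pySetD_natCast]
      have : (res ++ l).length = res.length + l.length := by simp
      rw [← this, set_append_length]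
    rw [hset, ← List.append_assoc] at *
    rw [ih res (PySem.List.pySetD row j (w ((res.length + l.length : Nat) : Int)) :: rest)]
    rw [List.mapIdx_append]
    simp


lemma yshift_eq_mapIdx (c : List (List Int)) (y z : Int) :
    yshift c y z = c.mapIdx (fun k row =>
      PySem.List.pySetD row (y - 1)
        (PySem.List.pyGetD (yshiftShift (c.map (fun r => PySem.List.pyGetD r (y - 1) 0)) z) ((k : Nat) : Int) 0)) := by
  unfold yshift
  rw [PySem.List.foldl_append_singleton_eq_map]
  have h := foldl_write_fw (y - 1)
    (fun i => PySem.List.pyGetD (yshiftShift ([] ++ c.map (fun r => PySem.List.pyGetD r (y - 1) 0)) z) i 0)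
    c [] []
  simpa using h


lemma alt_fold_one (c : List (List Int)) (y : Int) (hc : c ≠ []) :
    (PySem.List.pyRange 0 ((c.length : Int) - 1) 1).foldl
      (fun temp i =>
        PySem.List.pySetD temp i
          (PySem.List.pySetD (PySem.List.pyGetD temp i []) (y - 1)
            (PySem.List.pyGetD (PySem.List.pyGetD c (i + 1) []) (y - 1) 0))) c
    = (c.take (c.length - 1)).mapIdx (fun k row =>
        PySem.List.pySetD row (y - 1)
          (PySem.List.pyGetD (PySem.List.pyGetD c (((k : Nat) : Int) + 1) []) (y - 1) 0))
      ++ c.drop (c.length - 1) := by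
  have h := foldl_write_fw (y - 1)
    (fun i => PySem.List.pyGetD (PySem.List.pyGetD c (i + 1) []) (y - 1) 0)
    (c.take (c.length - 1)) [] (c.drop (c.length - 1))
  have hlen : (c.take (c.length - 1)).length = c.length - 1 := by
    simp
  rw [List.nil_append, List.nil_append, List.take_append_drop] at h
  rw [hlen] at h
  have hcast : ((c.length : Int) - 1) = ((c.length - 1 : Nat) : Int) := by
    have : 0 < c.length := List.length_pos_iff.mpr hc
    omega
  rw [hcast]
  have h0 : ((0 + (c.length - 1) : Nat) : Int) = ((c.length - 1 : Nat) : Int) := by simp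
  simpa [h0] using h


lemma alt_fold_other (c : List (List Int)) (y : Int) (hc : c ≠ []) :
    (PySem.List.pyRange ((c.length : Int) - 1) 0 (-1)).foldl
      (fun temp i =>
        PySem.List.pySetD temp i
          (PySem.List.pySetD (PySem.List.pyGetD temp i []) (y - 1)
            (PySem.List.pyGetD (PySem.List.pyGetD c (i - 1) []) (y - 1) 0))) c
    = c.take 1 ++ (c.drop 1).mapIdx (fun k row =>
        PySem.List.pySetD row (y - 1)
          (PySem.List.pyGetD (PySem.List.pyGetD c (((1 + k : Nat) : Int) - 1) []) (y - 1) 0)) := by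
  have h := foldl_write_bw (y - 1)
    (fun i => PySem.List.pyGetD (PySem.List.pyGetD c (i - 1) []) (y - 1) 0)
    (c.drop 1) (c.take 1) []
  have h1 : (c.take 1).length = 1 := by
    cases c with
    | nil => exact absurd rfl hc
    | cons a t => simp
  rw [h1] at h
  have h2 : ((1 + (c.drop 1).length : Nat) : Int) = (c.length : Int) := by
    have : 0 < c.length := List.length_pos_iff.mpr hc
    simp
    omega
  rw [h2] at h
  rw [List.take_append_drop, List.append_nil, List.append_nil] at h
  simpa using h


lemma yshift_eq_alt (c : List (List Int)) (y z : Int) : yshift c y z = yshift_alt c y z := by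
  rcases eq_or_ne c [] with rfl | hc
  · rfl
  have hn : 0 < c.length := List.length_pos_iff.mpr hc
  have hcast : ((c.length : Int) - 1) = ((c.length - 1 : Nat) : Int) := by omega
  rw [yshift_eq_mapIdx]
  unfold yshift_alt
  rw [if_neg (by omega)]
  by_cases hz : z = 1
  · subst hz
    rw [if_pos rfl]
    dsimp only []
    rw [alt_fold_one c y hc]
    have hB : c.drop (c.length - 1) = [c.getLast hc] := List.drop_length_sub_one hc
    rw [hB, hcast]
    have hAlen : ((c.take (c.length - 1)).mapIdx (fun k row =>
        PySem.List.pySetD row (y - 1)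
          (PySem.List.pyGetD (PySem.List.pyGetD c (((k : Nat) : Int) + 1) []) (y - 1) 0))).length
        = c.length - 1 := by simp
    have hget : PySem.List.pyGetD
        ((c.take (c.length - 1)).mapIdx (fun k row =>
          PySem.List.pySetD row (y - 1)
            (PySem.List.pyGetD (PySem.List.pyGetD c (((k : Nat) : Int) + 1) []) (y - 1) 0))
          ++ [c.getLast hc]) ((c.length - 1 : Nat) : Int) [] = c.getLast hc := by
      rw [PySem.List.pyGetD_natCast, List.getD_eq_getElem?_getD]
      rw [List.getElem?_append_right (by rw [hAlen])]
      simp [hAlen]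
    rw [hget]
    rw [PySem.List.pySetD_natCast]
    rw [set_append_singleton _ _ _ _ hAlen.symm]
    apply List.ext_getElem
    · simp; omega
    · intro k hk1 hk2
      rw [List.getElem_mapIdx]
      by_cases hk : k < c.length - 1
      · rw [List.getElem_append_left (by rw [hAlen]; omega)]
        rw [List.getElem_mapIdx]
        congr 1
        · exact (List.getElem_take).symm ▸ rfl
        · -- value equality for k < n-1
          rw [shift_one]
          rw [PySem.List.pyGetD_natCast, List.getD_eq_getElem?_getD]
          rw [List.getElem?_append_left (by simp; omega)]
          rw [List.getElem?_drop]
          have hk1n : 1 + k < c.length := by omega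
          rw [List.getElem?_map]
          rw [List.getElem?_eq_getElem hk1n]
          have : ((k : Nat) : Int) + 1 = ((k + 1 : Nat) : Int) := by push_cast; ring
          rw [this, PySem.List.pyGetD_natCast, List.getD_eq_getElem?_getD]
          rw [List.getElem?_eq_getElem (by omega : k + 1 < c.length)]
          simp [show 1 + k = k + 1 by omega]
      · have hkeq : k = c.length - 1 := by simp at hk1; omega
        subst hkeq
        rw [List.getElem_append_right (by rw [hAlen])]
        simp only [hAlen, Nat.sub_self]
        rw [List.getElem_singleton]
        simp only [shift_one]
        rw [PySem.List.pyGetD_natCast, List.getD_eq_getElem?_getD]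
        rw [List.getElem?_append_right (by simp)]
        obtain ⟨a, t, rfl⟩ := List.exists_cons_of_ne_nil hc
        simp [List.getLast_eq_getElem, PySem.List.pyGetD_zero_cons]
  · rw [if_neg hz]
    dsimp only []
    rw [alt_fold_other c y hc]
    obtain ⟨a, t, rfl⟩ := List.exists_cons_of_ne_nil hc
    simp only [List.take_succ_cons, List.take_zero, List.drop_succ_cons, List.drop_zero,
      List.singleton_append, PySem.List.pyGetD_zero_cons]
    have hset0 : ∀ (xs : List (List Int)) (v : List Int), PySem.List.pySetD xs 0 v = xs.set 0 v := by
      intro xs v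
      simpa using PySem.List.pySetD_natCast xs 0 v
    rw [hset0]
    simp only [List.set_cons_zero]
    rw [List.mapIdx_cons]
    congr 1
    · -- head
      have hget0 : ∀ (xs : List Int) (d : Int), PySem.List.pyGetD xs 0 d = xs.getD 0 d := by
        intro xs d
        simpa using PySem.List.pyGetD_natCast xs 0 d
      simp only [shift_other _ z hz, List.length_map, List.length_cons, Nat.add_sub_cancel]
      rw [PySem.List.pyGetD_natCast, List.getD_eq_getElem?_getD]
      rw [List.getElem?_append_left (by simp)]
      rw [List.getElem?_drop]
      simp only [Nat.add_zero]
      rw [List.getElem?_map, List.getElem?_eq_getElem (by simp : t.length < (a :: t).length)]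
      have hc2 : ((t.length + 1 : Nat) : Int) - 1 = ((t.length : Nat) : Int) := by
        push_cast
        ring
      rw [hc2, PySem.List.pyGetD_natCast, List.getD_eq_getElem?_getD]
      rw [List.getElem?_eq_getElem (by simp : t.length < (a :: t).length)]
      simp
    · -- tail
      apply List.ext_getElem
      · simp
      · intro i hi1 hi2
        rw [List.getElem_mapIdx, List.getElem_mapIdx]
        have hit : i < t.length := by simpa using hi1
        congr 1
        simp only [shift_other _ z hz, List.length_map, List.length_cons, Nat.add_sub_cancel]
        rw [PySem.List.pyGetD_natCast, List.getD_eq_getElem?_getD]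
        rw [List.getElem?_append_right (by simp)]
        simp only [List.length_drop, List.length_map, List.length_cons]
        have e2 : i + 1 - (t.length + 1 - t.length) = i := by omega
        rw [e2]
        have e3 : ((1 + i : Nat) : Int) - 1 = ((i : Nat) : Int) := by push_cast; ring
        rw [e3, PySem.List.pyGetD_natCast, List.getD_eq_getElem?_getD]
        simp [hit, List.getElem?_eq_getElem (by simp; omega : i < (a :: t).length)]
        rcases i with _ | m
        · simp
        · simp

-- ===== VERDICT (by name: the statement is the Claim_ definition above) =====
theorem yshift_spec : Claim_equal_yshift := by
  intro content y z _ _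
  unfold Spec_yshift
  exact yshift_eq_alt content y z
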